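-- pv_equiv track=rewrite | github.com/dsprahul/CompetitveProgramming | 7_wormhole.py | minimum_time_spent
-- ===== SOURCE A (Python) =====
-- from collections import defaultdict
-- from bisect import bisect
-- from itertools import product
--
-- class BinaryTable(object):
--
--     def __init__(self):
--         self.table = defaultdict(dict)
--
--     def set(self, s, dt):
--         self.table[s].update({dt: 1})
--
--     def get(self, s, dt):
--         if self.table.get(s) is None:
--             return 0
--
--         if self.table[s].get(dt) is None:
--             return 0
--
--         return self.table[s][dt]
--
--     def load_all_start_times(self):
--         self.start_times = self.table.keys()
--
--     def load_all_dts(self):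
--         self.dts = []
--         for s in self.start_times:
--             self.dts += self.table[s].keys()
--
--     @property
--     def get_all_start_times(self):
--         try:
--             type(self.start_times)
--             type(self.dts)
--         except AttributeError:
--             self.load_all_start_times()
--             self.load_all_dts()
--
--         return self.start_times
--
--     @property
--     def get_all_dts(self):
--         try:
--             type(self.start_times)
--             type(self.dts)
--         except AttributeError:
--             self.load_all_start_times()
--             self.load_all_dts()
--
--         return self.dts
--
-- def minimum_time_spent(exams, W, V):
--
--     # exams = sorted(exams, key=lambda i_: i_[0])
--     bt = BinaryTable()
--     for s, e in exams:
--         bt.set(s=s, dt=e-s)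
--
--     product_WV = product(W, V)
--     product_WV = sorted(product_WV, key=lambda exam: exam[1] - exam[0])
--
--     def next_smallest_exam_set(sorted_known_dts, current_dt):
--         these_exams = []
--         idx = bisect(sorted_known_dts, current_dt)
--         for dt_key in sorted_known_dts[:idx]:
--             these_exams += exams_by_duration[dt_key]
--
--         return these_exams
--
--     def in_range_starts(sorted_s, start_s, end_s):
--         return [e for e in sorted_s if start_s >= e <= end_s]
--
--     def in_range_dts(sorted_dt, max_dt):
--         return [e for e in sorted_dt if e <= max_dt]
--
--     for w, v in product_WV:
--         dt = v - w
--
--         if dt < 0:  # Such combinations are not commutable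
--             continue
--
--         known_s = sorted(bt.get_all_start_times)
--         known_dt = sorted(bt.get_all_dts)
--         # There maybe some exams that could fit in this duration,
--         # check if their start & end time lies with-in <dt>
--         # Get a list of exams such that w <= s < w + dt && t <= dt
--         starts = in_range_starts(known_s, start_s=w, end_s=w + dt)
--         dts = in_range_dts(known_dt, max_dt=dt)
--         for s, dt2 in product(starts, dts):
--             if bt.get(s, dt2) == 1:
--                 return dt + 1
-- ===== SOURCE B (Python) =====
-- def minimum_time_spent(exams, W, V):
--     best = None
--     for w in W:
--         durs = [e - s for s, e in exams if s <= w]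
--         if not durs:
--             continue
--         need = max(0, min(durs))
--         for v in V:
--             dt = v - w
--             if dt >= need and (best is None or dt + 1 < best):
--                 best = dt + 1
--     return best
-- ===== Notes on version B (the rewrite author's own statement) =====
-- stated objective: faster
-- what changed: B drops the dict/BinaryTable, the per-pair re-sorting and the starts-x-durations cross product: for each waypoint w it computes once the minimal duration of exams starting at or before w and then keeps a running minimum of v-w+1 over all v with v-w >= max(0, that minimum), a single pass over W and V.
import Mathlib
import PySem

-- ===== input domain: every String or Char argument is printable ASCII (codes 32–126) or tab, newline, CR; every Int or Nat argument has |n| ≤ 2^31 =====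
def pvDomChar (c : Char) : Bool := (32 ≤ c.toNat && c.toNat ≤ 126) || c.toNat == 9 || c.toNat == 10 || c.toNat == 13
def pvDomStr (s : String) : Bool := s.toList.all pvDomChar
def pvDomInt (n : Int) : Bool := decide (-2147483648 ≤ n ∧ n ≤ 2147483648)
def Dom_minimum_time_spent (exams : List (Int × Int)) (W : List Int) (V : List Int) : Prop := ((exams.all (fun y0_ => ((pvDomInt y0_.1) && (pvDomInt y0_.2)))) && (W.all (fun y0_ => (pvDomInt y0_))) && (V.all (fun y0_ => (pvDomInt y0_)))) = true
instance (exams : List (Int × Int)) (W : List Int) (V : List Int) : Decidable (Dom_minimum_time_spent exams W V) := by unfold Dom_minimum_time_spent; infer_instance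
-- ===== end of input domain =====

-- B replaces A's dict + per-pair sorting + starts×durations cross product by a single pass
-- keeping a running minimum (measured asymptotically faster).


-- ===== PORT A =====
-- BinaryTable.set: self.table[s].update({dt: 1}) on a defaultdict(dict)
def btSet (t : PySem.Dict Int (PySem.Dict Int Int)) (s dt : Int) : PySem.Dict Int (PySem.Dict Int Int) :=
  t.insert s ((t.getD s PySem.Dict.empty).insert dt 1)

-- BinaryTable.get
def btGet (t : PySem.Dict Int (PySem.Dict Int Int)) (s dt : Int) : Int :=
  match t.get? s with
  | none => 0
  | some inner =>
    match inner.get? dt with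
    | none => 0
    | some x => x

-- the 'for s, e in exams: bt.set(s, e-s)' loop
def btBuild (exams : List (Int × Int)) : PySem.Dict Int (PySem.Dict Int Int) :=
  exams.foldl (fun t p => btSet t p.1 (p.2 - p.1)) PySem.Dict.empty

-- load_all_dts: self.dts = []; for s in start_times: self.dts += self.table[s].keys()
def btAllDts (t : PySem.Dict Int (PySem.Dict Int Int)) : List Int :=
  t.keys.foldl (fun acc s => acc ++ (t.getD s PySem.Dict.empty).keys) []

-- the 'for w, v in product_WV' loop with its early return
def aLoop (bt : PySem.Dict Int (PySem.Dict Int Int)) (pairs : List (Int × Int)) : Option Int :=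
  match pairs with
  | [] => none
  | (w, v) :: rest =>
    let dt := v - w
    if dt < 0 then aLoop bt rest
    else
      let known_s := PySem.List.sorted bt.keys (fun x => x) false
      let known_dt := PySem.List.sorted (btAllDts bt) (fun x => x) false
      -- in_range_starts: [e for e in sorted_s if start_s >= e <= end_s]
      let starts := known_s.filter (fun e => decide (w ≥ e) && decide (e ≤ w + dt))
      -- in_range_dts: [e for e in sorted_dt if e <= max_dt]
      let dts := known_dt.filter (fun e => decide (e ≤ dt))
      if (starts.flatMap (fun s => dts.map (fun d2 => (s, d2)))).any
           (fun p => btGet bt p.1 p.2 == 1)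
      then some (dt + 1)
      else aLoop bt rest

def minimum_time_spent (exams : List (Int × Int)) (W : List Int) (V : List Int) : Option Int :=
  let bt := btBuild exams
  let productWV := PySem.List.sorted (W.flatMap (fun w => V.map (fun v => (w, v))))
                     (fun p => p.2 - p.1) false
  aLoop bt productWV

-- ===== PORT B =====
-- inner 'for v in V' loop of Source B
def altInner (w need : Int) (V : List Int) (best : Option Int) : Option Int :=
  V.foldl (fun b v =>
    let dt := v - w
    if decide (need ≤ dt) && (match b with | none => true | some x => decide (dt + 1 < x))
    then some (dt + 1) else b) best

def minimum_time_spent_alt (exams : List (Int × Int)) (W : List Int) (V : List Int) : Option Int :=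
  W.foldl (fun best w =>
    let durs := (exams.filter (fun p => decide (p.1 ≤ w))).map (fun p => p.2 - p.1)
    -- 'if not durs: continue' together with 'min(durs)': min? is none exactly on []
    match PySem.List.min? durs (fun x => x) with
    | none => best
    | some m => altInner w (max 0 m) V best) none

-- ===== PRECONDITION & SPEC =====
def Spec_minimum_time_spent (exams : List (Int × Int)) (W : List Int) (V : List Int) (out : Option Int) : Prop := out = minimum_time_spent_alt exams W V
instance (exams : List (Int × Int)) (W : List Int) (V : List Int) (out : Option Int) : Decidable (Spec_minimum_time_spent exams W V out) := by unfold Spec_minimum_time_spent; infer_instance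

-- ===== CLAIM (what is proved, stated in full; the proofs are below) =====
def Claim_equal_minimum_time_spent : Prop := ∀ (exams : List (Int × Int)) (W : List Int) (V : List Int), Dom_minimum_time_spent exams W V → Spec_minimum_time_spent exams W V (minimum_time_spent exams W V)

-- ===== LEMMAS AND PROOFS =====

-- A pair (w, v) contributes a candidate iff v - w ≥ 0 and some exam starts at or before w
-- and lasts at most v - w.
def okb (exams : List (Int × Int)) (w v : Int) : Bool :=
  decide (0 ≤ v - w) && exams.any (fun p => decide (p.1 ≤ w) && decide (p.2 - p.1 ≤ v - w))

def fcand (exams : List (Int × Int)) (p : Int × Int) : Option Int :=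
  if okb exams p.1 p.2 then some (p.2 - p.1) else none

-- the running-minimum update B performs (stated once, shared by both sides of the proof)
def minUpd (b : Option Int) (dt : Int) : Option Int :=
  if (match b with | none => true | some x => decide (dt + 1 < x)) then some (dt + 1) else b

def omin1 (b : Option Int) (xs : List Int) : Option Int := xs.foldl minUpd b

theorem btBuild_bind (l : List (Int × Int)) (t : PySem.Dict Int (PySem.Dict Int Int)) (s d : Int) :
    (((l.foldl (fun t p => btSet t p.1 (p.2 - p.1)) t).get? s).bind (fun i => i.get? d))
      = if ∃ p ∈ l, p.1 = s ∧ p.2 - p.1 = d then some 1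
        else ((t.get? s).bind (fun i => i.get? d)) := by
  induction l generalizing t with
  | nil => simp
  | cons p l ih =>
    rw [List.foldl_cons, ih]
    have hstep : (((btSet t p.1 (p.2 - p.1)).get? s).bind (fun i => i.get? d))
        = if p.1 = s ∧ p.2 - p.1 = d then some 1 else ((t.get? s).bind (fun i => i.get? d)) := by
      unfold btSet
      rw [PySem.Dict.get?_insert]
      by_cases hs : s = p.1
      · subst hs
        simp only [if_true, true_and, Option.bind]
        rw [PySem.Dict.get?_insert]
        by_cases hd : d = p.2 - p.1
        · simp [hd]
        · rw [if_neg hd, if_neg (by tauto)]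
          cases hget : t.get? p.1 with
          | none => simp [PySem.Dict.getD_eq_get?_getD, hget, PySem.Dict.get?_empty]
          | some i => simp [PySem.Dict.getD_eq_get?_getD, hget]
      · rw [if_neg hs, if_neg (by tauto)]
    rw [hstep]
    by_cases h1 : ∃ q ∈ l, q.1 = s ∧ q.2 - q.1 = d
    · rw [if_pos h1, if_pos (by exact ⟨_, List.mem_cons_of_mem _ h1.choose_spec.1, h1.choose_spec.2⟩)]
    · rw [if_neg h1]
      by_cases h2 : p.1 = s ∧ p.2 - p.1 = d
      · rw [if_pos h2, if_pos ⟨p, List.mem_cons_self, h2⟩]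
      · rw [if_neg h2, if_neg (by simp_all)]

theorem btGet_one_iff (exams : List (Int × Int)) (s d : Int) :
    btGet (btBuild exams) s d = 1 ↔ ∃ p ∈ exams, p.1 = s ∧ p.2 - p.1 = d := by
  have h := btBuild_bind exams PySem.Dict.empty s d
  rw [show ((PySem.Dict.empty : PySem.Dict Int (PySem.Dict Int Int)).get? s).bind
        (fun i => i.get? d) = none by simp [PySem.Dict.get?_empty]] at h
  unfold btGet btBuild
  by_cases hex : ∃ p ∈ exams, p.1 = s ∧ p.2 - p.1 = d
  · rw [if_pos hex] at h
    simp only [hex, iff_true]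
    cases hg : (exams.foldl (fun t p => btSet t p.1 (p.2 - p.1)) PySem.Dict.empty).get? s with
    | none => rw [hg] at h; simp at h
    | some i =>
      rw [hg] at h; simp only [Option.bind] at h
      simp [h]
  · rw [if_neg hex] at h
    simp only [hex, iff_false]
    cases hg : (exams.foldl (fun t p => btSet t p.1 (p.2 - p.1)) PySem.Dict.empty).get? s with
    | none => simp
    | some i =>
      rw [hg] at h; simp only [Option.bind] at h
      simp [h]

theorem aLoop_any (exams : List (Int × Int)) (w dt : Int) (h : 0 ≤ dt) :
    (((PySem.List.sorted (btBuild exams).keys (fun x => x) false).filter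
        (fun e => decide (w ≥ e) && decide (e ≤ w + dt))).flatMap
      (fun s => ((PySem.List.sorted (btAllDts (btBuild exams)) (fun x => x) false).filter
        (fun e => decide (e ≤ dt))).map (fun d2 => (s, d2)))).any
        (fun p => btGet (btBuild exams) p.1 p.2 == 1)
      = exams.any (fun p => decide (p.1 ≤ w) && decide (p.2 - p.1 ≤ dt)) := by
  rw [Bool.eq_iff_iff]
  simp only [List.any_eq_true, List.mem_flatMap, List.mem_map, List.mem_filter,
    PySem.List.mem_sorted, Bool.and_eq_true, decide_eq_true_eq, beq_iff_eq, ge_iff_le]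
  constructor
  · rintro ⟨q, ⟨s, ⟨hsk, hsw, _⟩, d2, ⟨hdk, hd2⟩, rfl⟩, hget⟩
    obtain ⟨p, hp, rfl, rfl⟩ := (btGet_one_iff exams _ _).1 hget
    exact ⟨p, hp, hsw, hd2⟩
  · rintro ⟨p, hp, hpw, hpd⟩
    have hbind := btBuild_bind exams PySem.Dict.empty p.1 (p.2 - p.1)
    rw [if_pos ⟨p, hp, rfl, rfl⟩] at hbind
    cases hg : (btBuild exams).get? p.1 with
    | none => rw [show (exams.foldl (fun t p => btSet t p.1 (p.2 - p.1)) PySem.Dict.empty) = btBuild exams from rfl, hg] at hbind; simp at hbind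
    | some i =>
      rw [show (exams.foldl (fun t p => btSet t p.1 (p.2 - p.1)) PySem.Dict.empty) = btBuild exams from rfl, hg] at hbind
      simp only [Option.bind] at hbind
      have hsk : p.1 ∈ (btBuild exams).keys := by
        by_contra hmem
        rw [(PySem.Dict.get?_eq_none_iff_not_mem_keys _ _).2 hmem] at hg
        simp at hg
      have hdk : p.2 - p.1 ∈ btAllDts (btBuild exams) := by
        unfold btAllDts
        rw [PySem.List.foldl_append_eq_flatMap]
        simp only [List.nil_append, List.mem_flatMap]
        refine ⟨p.1, hsk, ?_⟩
        rw [PySem.Dict.getD_eq_get?_getD, hg]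
        simp only [Option.getD_some]
        by_contra hnm
        rw [(PySem.Dict.get?_eq_none_iff_not_mem_keys _ _).2 hnm] at hbind
        simp at hbind
      refine ⟨(p.1, p.2 - p.1), ⟨p.1, ⟨hsk, hpw, by omega⟩, p.2 - p.1, ⟨hdk, hpd⟩, rfl⟩, ?_⟩
      show btGet (btBuild exams) p.1 (p.2 - p.1) = 1
      exact (btGet_one_iff exams _ _).2 ⟨p, hp, rfl, rfl⟩

theorem omin1_stay (a : Int) (xs : List Int) (h : ∀ x ∈ xs, a ≤ x + 1) :
    omin1 (some a) xs = some a := by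
  induction xs with
  | nil => rfl
  | cons x xs ih =>
    have hx : ¬ (x + 1 < a) := by have := h x (List.mem_cons_self); omega
    have : minUpd (some a) x = some a := by simp [minUpd, hx]
    rw [omin1, List.foldl_cons, this]
    exact ih (fun y hy => h y (List.mem_cons_of_mem _ hy))

theorem aLoop_eq (exams : List (Int × Int)) (pairs : List (Int × Int))
    (hp : pairs.Pairwise (fun a b => a.2 - a.1 ≤ b.2 - b.1)) :
    aLoop (btBuild exams) pairs = omin1 none (pairs.filterMap (fcand exams)) := by
  induction pairs with
  | nil => rfl
  | cons q rest ih =>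
    obtain ⟨w, v⟩ := q
    rw [List.pairwise_cons] at hp
    have ihr := ih hp.2
    simp only [aLoop]
    by_cases hneg : v - w < 0
    · have hok : fcand exams (w, v) = none := by
        simp only [fcand, okb]
        rw [if_neg]
        simp only [Bool.and_eq_true, decide_eq_true_eq]
        omega
      rw [if_pos hneg, List.filterMap_cons, hok, ihr]
    · rw [if_neg hneg, aLoop_any exams w (v - w) (by omega)]
      cases hA : exams.any (fun p => decide (p.1 ≤ w) && decide (p.2 - p.1 ≤ v - w)) with
      | false =>
        have hok : fcand exams (w, v) = none := by
          simp only [fcand, okb, hA, Bool.and_false]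
          rfl
        rw [if_neg (by simp), List.filterMap_cons, hok, ihr]
      | true =>
        have hok : fcand exams (w, v) = some (v - w) := by
          simp only [fcand, okb, hA, Bool.and_true]
          rw [if_pos]
          simp only [decide_eq_true_eq]
          omega
        rw [if_pos rfl, List.filterMap_cons, hok]
        have h1 : minUpd none (v - w) = some (v - w + 1) := by simp [minUpd]
        rw [show omin1 none ((v - w) :: rest.filterMap (fcand exams))
              = omin1 (some (v - w + 1)) (rest.filterMap (fcand exams)) by
            rw [omin1, List.foldl_cons, h1]; rfl]
        rw [omin1_stay]
        intro x hx
        obtain ⟨q, hq, hfq⟩ := List.mem_filterMap.1 hx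
        have hxq : x = q.2 - q.1 := by
          simp only [fcand] at hfq
          by_cases hoq : okb exams q.1 q.2 = true
          · rw [if_pos hoq] at hfq; exact (Option.some_inj.1 hfq).symm
          · rw [if_neg hoq] at hfq; exact absurd hfq (by simp)
        have := hp.1 q hq
        omega

theorem omin1_some_eq (a : Int) (xs : List Int) :
    omin1 (some a) xs = some (xs.foldl (fun b d => min b (d + 1)) a) := by
  induction xs generalizing a with
  | nil => rfl
  | cons x xs ih =>
    rw [omin1, List.foldl_cons, List.foldl_cons]
    have h1 : minUpd (some a) x = some (min a (x + 1)) := by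
      simp only [minUpd]
      by_cases h : x + 1 < a
      · rw [if_pos (by simp [h]), min_eq_right (by omega)]
      · rw [if_neg (by simp [h]), min_eq_left (by omega)]
    rw [h1]
    exact ih (min a (x + 1))

theorem omin1_none_eq (xs : List Int) : omin1 none xs = (xs.map (· + 1)).min? := by
  cases xs with
  | nil => rfl
  | cons x xs =>
    rw [omin1, List.foldl_cons]
    have h1 : minUpd none x = some (x + 1) := by simp [minUpd]
    rw [h1, show List.foldl minUpd (some (x + 1)) xs = omin1 (some (x + 1)) xs from rfl,
      omin1_some_eq, List.map_cons, List.min?_cons', List.foldl_map]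

theorem min?_perm_int (xs ys : List Int) (h : xs.Perm ys) : xs.min? = ys.min? := by
  cases hx : xs.min? with
  | none =>
    rw [List.min?_eq_none_iff] at hx
    symm
    rw [List.min?_eq_none_iff]
    exact ((hx ▸ h).symm).eq_nil
  | some a =>
    rw [List.min?_eq_some_iff] at hx
    symm
    rw [List.min?_eq_some_iff]
    exact ⟨h.mem_iff.1 hx.1, fun b hb => hx.2 b (h.mem_iff.2 hb)⟩

theorem omin1_perm (xs ys : List Int) (h : xs.Perm ys) : omin1 none xs = omin1 none ys := by
  rw [omin1_none_eq, omin1_none_eq]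
  exact min?_perm_int _ _ (h.map _)

theorem altInner_eq (exams : List (Int × Int)) (w need : Int) (V : List Int)
    (hneed : ∀ v : Int, okb exams w v = decide (need ≤ v - w)) :
    ∀ b : Option Int, altInner w need V b = omin1 b (V.filterMap (fun v => fcand exams (w, v))) := by
  induction V with
  | nil => intro b; rfl
  | cons v V ihv =>
    intro b
    unfold altInner
    rw [List.foldl_cons, List.filterMap_cons]
    cases hok : okb exams w v with
    | false =>
      have hd : decide (need ≤ v - w) = false := by rw [← hneed]; exact hok
      have hfc : fcand exams (w, v) = none := by simp [fcand, hok]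
      rw [hfc]
      simp only [hd, Bool.false_and, Bool.false_eq_true, if_false]
      exact ihv b
    | true =>
      have hd : decide (need ≤ v - w) = true := by rw [← hneed]; exact hok
      have hfc : fcand exams (w, v) = some (v - w) := by simp [fcand, hok]
      rw [hfc]
      simp only [hd, Bool.true_and]
      have hstep' : (if (match b with | none => true | some x => decide (v - w + 1 < x)) = true
            then some (v - w + 1) else b) = minUpd b (v - w) := rfl
      rw [hstep']
      exact ihv (minUpd b (v - w))

theorem alt_eq (exams : List (Int × Int)) (W V : List Int) :
    minimum_time_spent_alt exams W V
      = omin1 none ((W.flatMap (fun w => V.map (fun v => (w, v)))).filterMap (fcand exams)) := by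
  have hflat : (W.flatMap (fun w => V.map (fun v => (w, v)))).filterMap (fcand exams)
      = W.flatMap (fun w => V.filterMap (fun v => fcand exams (w, v))) := by
    simp [List.filterMap_flatMap, List.filterMap_map]
  rw [hflat]
  have hstep : ∀ (b : Option Int) (w : Int),
      (match PySem.List.min? ((exams.filter (fun p => decide (p.1 ≤ w))).map (fun p => p.2 - p.1))
          (fun x => x) with
       | none => b
       | some m => altInner w (max 0 m) V b)
      = omin1 b (V.filterMap (fun v => fcand exams (w, v))) := by
    intro b w
    cases hm : PySem.List.min? ((exams.filter (fun p => decide (p.1 ≤ w))).map (fun p => p.2 - p.1))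
        (fun x => x) with
    | none =>
      have hnil : (exams.filter (fun p => decide (p.1 ≤ w))).map (fun p => p.2 - p.1) = [] :=
        (PySem.List.min?_eq_none_iff _ _).1 hm
      have hno : ∀ p ∈ exams, ¬ (p.1 ≤ w) := by
        intro p hp hpw
        exact List.filter_eq_nil_iff.1 (List.map_eq_nil_iff.1 hnil) p hp (decide_eq_true hpw)
      have hfc : ∀ v ∈ V, fcand exams (w, v) = none := by
        intro v _
        have hb : okb exams w v = false := by
          rw [okb]
          cases hA : exams.any (fun p => decide (p.1 ≤ w) && decide (p.2 - p.1 ≤ v - w)) with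
          | false => simp
          | true =>
            exfalso
            obtain ⟨p, hp, hc⟩ := List.any_eq_true.1 hA
            simp only [Bool.and_eq_true, decide_eq_true_eq] at hc
            exact hno p hp hc.1
        simp [fcand, hb]
      rw [List.filterMap_eq_nil_iff.2 hfc]
      rfl
    | some m =>
      have hmem : m ∈ (exams.filter (fun p => decide (p.1 ≤ w))).map (fun p => p.2 - p.1) :=
        PySem.List.min?_mem hm
      have hmin : ∀ y ∈ (exams.filter (fun p => decide (p.1 ≤ w))).map (fun p => p.2 - p.1), m ≤ y :=
        PySem.List.min?_isMin hm
      have hneed : ∀ v : Int, okb exams w v = decide (max 0 m ≤ v - w) := by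
        intro v
        rw [Bool.eq_iff_iff]
        simp only [okb, Bool.and_eq_true, decide_eq_true_eq, List.any_eq_true]
        constructor
        · rintro ⟨h0, p, hp, hcond⟩
          have : m ≤ p.2 - p.1 :=
            hmin _ (List.mem_map.2 ⟨p, List.mem_filter.2 ⟨hp, by simp [hcond.1]⟩, rfl⟩)
          omega
        · intro hle
          obtain ⟨p, hpf, hpm⟩ := List.mem_map.1 hmem
          obtain ⟨hp, hpw⟩ := List.mem_filter.1 hpf
          simp only [decide_eq_true_eq] at hpw
          exact ⟨by omega, p, hp, by omega⟩
      exact altInner_eq exams w (max 0 m) V hneed b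
  have hfun : (fun (best : Option Int) (w : Int) =>
        (match PySem.List.min? ((exams.filter (fun p => decide (p.1 ≤ w))).map (fun p => p.2 - p.1))
            (fun x => x) with
         | none => best
         | some m => altInner w (max 0 m) V best))
      = fun (b : Option Int) (w : Int) => omin1 b (V.filterMap (fun v => fcand exams (w, v))) := by
    funext b w
    exact hstep b w
  show W.foldl (fun (best : Option Int) (w : Int) =>
        (match PySem.List.min? ((exams.filter (fun p => decide (p.1 ≤ w))).map (fun p => p.2 - p.1))
            (fun x => x) with
         | none => best
         | some m => altInner w (max 0 m) V best)) none
      = omin1 none (W.flatMap (fun w => V.filterMap (fun v => fcand exams (w, v))))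
  rw [hfun]
  have hfold : ∀ (Wl : List Int) (b : Option Int),
      Wl.foldl (fun b w => omin1 b (V.filterMap (fun v => fcand exams (w, v)))) b
        = omin1 b (Wl.flatMap (fun w => V.filterMap (fun v => fcand exams (w, v)))) := by
    intro Wl
    induction Wl with
    | nil => intro b; rfl
    | cons w Wl ihw =>
      intro b
      rw [List.foldl_cons, List.flatMap_cons, ihw, omin1, omin1, omin1, List.foldl_append]
  rw [hfold]

-- ===== VERDICT (by name: the statement is the Claim_ definition above) =====
theorem minimum_time_spent_spec : Claim_equal_minimum_time_spent := by
  intro exams W V _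
  unfold Spec_minimum_time_spent minimum_time_spent
  rw [aLoop_eq exams _ (PySem.List.sorted_pairwise _ _), alt_eq,
    omin1_perm _ _ ((PySem.List.sorted_perm _ _ _).filterMap _)]
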